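-- pv_equiv track=rewrite | github.com/pypi-data/pypi-mirror-354 | packages/git-smart-squash/git_smart_squash-3.2.1.tar.gz/git_smart_squash-3.2.1/git_smart_squash/hunk_applicator.py | _validate_patch_format
-- ===== SOURCE A (Python) =====
-- def _validate_patch_format(patch_content: str) -> bool:
--     """
--     Validate that a patch has the correct format before applying.
--
--     Args:
--         patch_content: The patch content to validate
--
--     Returns:
--         True if patch format is valid, False otherwise
--     """
--     lines = patch_content.strip().split('\n')
--
--     if not lines:
--         return False
--
--     # Must start with diff --git
--     if not lines[0].startswith('diff --git'):
--         return False
--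
--     # Must have at least one @@ hunk header
--     has_hunk = any(line.startswith('@@') for line in lines)
--     if not has_hunk:
--         return False
--
--     # Check for basic file header structure
--     has_file_markers = any(line.startswith('---') for line in lines) and \
--                       any(line.startswith('+++') for line in lines)
--
--     if not has_file_markers:
--         return False
--
--     return True
-- ===== SOURCE B (Python) =====
-- def _validate_patch_format(patch_content: str) -> bool:
--     # A marker line other than the first always follows a '\n'; since the first
--     # line must start with 'diff --git', substring search replaces line splitting.
--     s = patch_content.strip()
--     return (s.startswith('diff --git')
--             and '\n@@' in s and '\n---' in s and '\n+++' in s)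
-- ===== Notes on version B (the rewrite author's own statement) =====
-- stated objective: alternative
-- what changed: B never splits the patch into lines: it checks the diff header as a prefix of the stripped text and finds each marker (hunk header, minus-file, plus-file) by searching for newline-plus-marker as a substring of the whole text, correct because a non-first line start is exactly a position after a newline and the first line cannot start with a marker once the header guard passes.
import Mathlib
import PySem

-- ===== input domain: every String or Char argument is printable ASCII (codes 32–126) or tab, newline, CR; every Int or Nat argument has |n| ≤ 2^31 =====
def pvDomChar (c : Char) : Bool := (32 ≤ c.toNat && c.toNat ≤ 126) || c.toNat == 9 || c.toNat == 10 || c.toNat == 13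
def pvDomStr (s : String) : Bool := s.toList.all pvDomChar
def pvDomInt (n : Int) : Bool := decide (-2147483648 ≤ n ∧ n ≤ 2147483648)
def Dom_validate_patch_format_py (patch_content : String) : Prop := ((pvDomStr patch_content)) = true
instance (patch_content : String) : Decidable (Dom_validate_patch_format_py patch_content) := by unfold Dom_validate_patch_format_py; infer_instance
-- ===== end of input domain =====

-- B never splits the text into lines: it tests 'diff --git' as a prefix of the stripped
-- text and locates each marker by substring search for newline followed by the marker
-- (alternative algorithm, same cost).

-- ===== PORT A =====
-- `.strip().split('\n')` on a non-empty separator: Chars.splitOn on the code points, exact.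
def validate_patch_format_py (patch_content : String) : Bool :=
  let lines := PySem.Chars.splitOn (PySem.Str.strip patch_content).toList ['\n']
  match lines with
  | [] => false                                     -- Python's `if not lines: return False` (split never yields [])
  | l0 :: _ =>
    if !(PySem.Chars.startswith l0 ['d','i','f','f',' ','-','-','g','i','t']) then false
    else
      let has_hunk := lines.any (fun line => PySem.Chars.startswith line ['@','@'])
      if !has_hunk then false
      else
        let has_file_markers :=
          (lines.any (fun line => PySem.Chars.startswith line ['-','-','-'])) &&
          (lines.any (fun line => PySem.Chars.startswith line ['+','+','+']))
        if !has_file_markers then false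
        else true

-- ===== PORT B =====
-- `sub in s` on strings: Chars.isIn, exact.
def validate_patch_format_py_alt (patch_content : String) : Bool :=
  let s := (PySem.Str.strip patch_content).toList
  PySem.Chars.startswith s ['d','i','f','f',' ','-','-','g','i','t'] &&
  PySem.Chars.isIn ['\n','@','@'] s &&
  PySem.Chars.isIn ['\n','-','-','-'] s &&
  PySem.Chars.isIn ['\n','+','+','+'] s

-- ===== PRECONDITION & SPEC =====
def Spec_validate_patch_format_py (patch_content : String) (out : Bool) : Prop := out = validate_patch_format_py_alt patch_content
instance (patch_content : String) (out : Bool) : Decidable (Spec_validate_patch_format_py patch_content out) := by unfold Spec_validate_patch_format_py; infer_instance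

-- ===== CLAIM (what is proved, stated in full; the proofs are below) =====
def Claim_equal_validate_patch_format_py : Prop := ∀ (patch_content : String), Dom_validate_patch_format_py patch_content → Spec_validate_patch_format_py patch_content (validate_patch_format_py patch_content)

-- ===== LEMMAS AND PROOFS =====

-- a simple structural model of split('\n'), with splitOn_eq_pvSplitNL bridging to the port
def pvSplitNL : List Char → List (List Char)
  | [] => [[]]
  | c :: rest => if c = '\n' then [] :: pvSplitNL rest
                 else match pvSplitNL rest with
                      | [] => [[c]]
                      | h :: t => (c :: h) :: t

theorem pvSplitNL_ne_nil (s : List Char) : pvSplitNL s ≠ [] := by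
  cases s with
  | nil => simp [pvSplitNL]
  | cons c rest =>
    simp only [pvSplitNL]
    split_ifs
    · simp
    · cases h : pvSplitNL rest <;> simp

theorem splitOn_go_eq (fuel : Nat) : ∀ (l cur : List Char) (accs : List (List Char)),
    l.length < fuel →
    PySem.Chars.splitOn.go ['\n'] fuel l cur accs = accs.reverse ++ (pvSplitNL l).modifyHead (cur.reverse ++ ·) := by
  induction fuel with
  | zero => intro l cur accs h; omega
  | succ f ih =>
    intro l cur accs h
    cases l with
    | nil =>
      rw [PySem.Chars.splitOn.go]
      · simp [pvSplitNL]
      · omega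
    | cons c rest =>
      rw [PySem.Chars.splitOn.go]
      by_cases hc : c = '\n'
      · subst hc
        rw [if_pos (by simp [List.isPrefixOf])]
        show PySem.Chars.splitOn.go ['\n'] f (List.drop 1 ('\n'::rest)) [] (cur.reverse :: accs) = _
        rw [List.drop_one, List.tail_cons,
            ih rest [] (cur.reverse :: accs) (by simp at h; omega)]
        simp only [pvSplitNL, if_pos rfl, List.modifyHead_cons, List.reverse_cons,
          List.append_assoc, List.reverse_nil, List.nil_append, List.singleton_append]
        cases hr : pvSplitNL rest with
        | nil => exact absurd hr (pvSplitNL_ne_nil rest)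
        | cons hd tl => simp
      · rw [if_neg (by simp [List.isPrefixOf]; intro hh; exact absurd hh.symm hc)]
        rw [ih rest (c :: cur) accs (by simp at h; omega)]
        simp only [pvSplitNL, if_neg hc]
        cases hr : pvSplitNL rest with
        | nil => exact absurd hr (pvSplitNL_ne_nil rest)
        | cons hd tl => simp

theorem splitOn_eq_pvSplitNL (s : List Char) :
    PySem.Chars.splitOn s ['\n'] = pvSplitNL s := by
  show PySem.Chars.splitOn.go _ _ _ _ _ = _
  rw [splitOn_go_eq (s.length + 1) s [] [] (by omega)]
  cases h : pvSplitNL s with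
  | nil => exact absurd h (pvSplitNL_ne_nil s)
  | cons hd tl => simp

theorem prefix_iff_prefix_head (s : List Char) : ∀ (m h : List Char) (t : List (List Char)),
    '\n' ∉ m → pvSplitNL s = h :: t → (m <+: s ↔ m <+: h) := by
  induction s with
  | nil =>
    intro m h t _ he
    simp only [pvSplitNL] at he
    injection he with h1 _
    subst h1; rfl
  | cons c rest ih =>
    intro m h t hm he
    by_cases hc : c = '\n'
    · subst hc
      simp only [pvSplitNL, if_pos rfl] at he
      injection he with h1 _
      subst h1
      cases m with
      | nil => simp
      | cons d m' =>
        constructor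
        · intro hp
          rcases List.cons_prefix_cons.mp hp with ⟨hd, _⟩
          exact absurd (hd ▸ List.mem_cons_self) hm
        · intro hp; simp at hp
    · simp only [pvSplitNL, if_neg hc] at he
      cases hr : pvSplitNL rest with
      | nil => exact absurd hr (pvSplitNL_ne_nil rest)
      | cons h' t' =>
        rw [hr] at he
        injection he with h1 _
        subst h1
        cases m with
        | nil => simp
        | cons d m' =>
          rw [List.cons_prefix_cons, List.cons_prefix_cons]
          have hm' : '\n' ∉ m' := fun hx => hm (List.mem_cons_of_mem _ hx)
          rw [ih m' h' t' hm' hr]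

theorem infix_iff_tail_any (m : List Char) (hm : '\n' ∉ m) : ∀ (s : List Char),
    (('\n' :: m) <:+: s) ↔ ((pvSplitNL s).tail.any (fun l => PySem.Chars.startswith l m) = true) := by
  intro s
  induction s with
  | nil => simp [pvSplitNL]
  | cons c rest ih =>
    rw [List.infix_cons_iff]
    by_cases hc : c = '\n'
    · subst hc
      simp only [pvSplitNL, eq_self_iff_true, if_true, List.tail_cons]
      cases hr : pvSplitNL rest with
      | nil => exact absurd hr (pvSplitNL_ne_nil rest)
      | cons h' t' =>
        rw [List.any_cons]
        constructor
        · rintro (hp | hi)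
          · have := (List.cons_prefix_cons.mp hp).2
            have : m <+: h' := (prefix_iff_prefix_head rest m h' t' hm hr).mp this
            simp [((PySem.Chars.startswith_iff h' m).mpr this)]
          · rw [hr] at ih
            simp only [List.tail_cons] at ih
            simp [ih.mp hi]
        · intro hor
          rcases Bool.or_eq_true_iff.mp hor with hs | ha
          · left
            refine List.cons_prefix_cons.mpr ⟨rfl, ?_⟩
            exact (prefix_iff_prefix_head rest m h' t' hm hr).mpr
              ((PySem.Chars.startswith_iff h' m).mp hs)
          · right
            rw [hr] at ih
            simp only [List.tail_cons] at ih
            exact ih.mpr ha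
    · simp only [pvSplitNL, if_neg hc]
      cases hr : pvSplitNL rest with
      | nil => exact absurd hr (pvSplitNL_ne_nil rest)
      | cons h' t' =>
        rw [hr] at ih
        simp only [List.tail_cons] at ih ⊢
        rw [← ih]
        constructor
        · rintro (hp | hi)
          · exact absurd (List.cons_prefix_cons.mp hp).1.symm hc
          · exact hi
        · intro hi; right; exact hi
theorem ports_agree (p : String) : validate_patch_format_py p = validate_patch_format_py_alt p := by
  unfold validate_patch_format_py validate_patch_format_py_alt
  simp only [splitOn_eq_pvSplitNL]
  cases h : pvSplitNL (PySem.Str.strip p).toList with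
  | nil => exact absurd h (pvSplitNL_ne_nil _)
  | cons h0 t0 =>
    have hisIn : ∀ m : List Char, '\n' ∉ m →
        PySem.Chars.isIn ('\n'::m) (PySem.Str.strip p).toList
          = t0.any (fun l => PySem.Chars.startswith l m) := by
      intro m hm
      rw [Bool.eq_iff_iff, PySem.Chars.isIn_iff_infix, infix_iff_tail_any m hm, h, List.tail_cons]
    have hdg : PySem.Chars.startswith (PySem.Str.strip p).toList ['d','i','f','f',' ','-','-','g','i','t']
        = PySem.Chars.startswith h0 ['d','i','f','f',' ','-','-','g','i','t'] := by
      rw [Bool.eq_iff_iff, PySem.Chars.startswith_iff, PySem.Chars.startswith_iff]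
      exact prefix_iff_prefix_head _ _ h0 t0 (by decide) h
    rw [hdg, hisIn ['@','@'] (by decide), hisIn ['-','-','-'] (by decide),
        hisIn ['+','+','+'] (by decide)]
    cases hg : PySem.Chars.startswith h0 ['d','i','f','f',' ','-','-','g','i','t'] with
    | false => simp [hg]
    | true =>
      obtain ⟨r, hr⟩ := (PySem.Chars.startswith_iff _ _).mp hg
      have htl : ∃ tl, h0 = 'd' :: tl := ⟨_, hr.symm⟩
      obtain ⟨tl, htl⟩ := htl
      have hnom : ∀ (c : Char) (m : List Char), c ≠ 'd' → PySem.Chars.startswith h0 (c::m) = false := by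
        intro c m hc
        cases hb : PySem.Chars.startswith h0 (c::m) with
        | false => rfl
        | true =>
          have hpb := (PySem.Chars.startswith_iff _ _).mp hb
          rw [htl] at hpb
          exact absurd (List.cons_prefix_cons.mp hpb).1 hc
      simp only [List.any_cons, hnom '@' ['@'] (by decide), hnom '-' ['-','-'] (by decide),
        hnom '+' ['+','+'] (by decide), Bool.false_or]
      cases t0.any (fun l => PySem.Chars.startswith l ['@','@']) <;>
        cases t0.any (fun l => PySem.Chars.startswith l ['-','-','-']) <;>
          cases t0.any (fun l => PySem.Chars.startswith l ['+','+','+']) <;> simp [hg]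

-- ===== VERDICT (by name: the statement is the Claim_ definition above) =====
theorem validate_patch_format_py_spec : Claim_equal_validate_patch_format_py := by
  intro p _
  exact ports_agree p
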